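-- pv_equiv track=rewrite | github.com/iamtatsuki05/nlp_template | src/nlp/constract_llm/dataset/cleanse/text.py | cleansed_duplicated_texts
-- ===== SOURCE A (Python) =====
-- def cleansed_duplicated_texts(texts: list[str | None]) -> list[str | None]:
--     cleansed: list[str | None] = []
--     mother_set = set()
--     for text in texts:
--         if text not in mother_set:
--             cleansed.append(text)
--             mother_set.add(text)
--         else:
--             cleansed.append(None)
--     return cleansed
-- ===== SOURCE B (Python) =====
-- def cleansed_duplicated_texts(texts):
--     first_index = {}
--     for i, t in enumerate(texts):
--         if t not in first_index:
--             first_index[t] = i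
--     return [t if first_index[t] == i else None for i, t in enumerate(texts)]
-- ===== Notes on version B (the rewrite author's own statement) =====
-- stated objective: alternative
-- what changed: B splits the work into two passes: it first builds a dict mapping each text to its first-occurrence index, then constructs the output positionally by comparing each index with the stored first index, instead of A's single interleaved membership-test-and-append loop over a growing set.
import Mathlib
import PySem

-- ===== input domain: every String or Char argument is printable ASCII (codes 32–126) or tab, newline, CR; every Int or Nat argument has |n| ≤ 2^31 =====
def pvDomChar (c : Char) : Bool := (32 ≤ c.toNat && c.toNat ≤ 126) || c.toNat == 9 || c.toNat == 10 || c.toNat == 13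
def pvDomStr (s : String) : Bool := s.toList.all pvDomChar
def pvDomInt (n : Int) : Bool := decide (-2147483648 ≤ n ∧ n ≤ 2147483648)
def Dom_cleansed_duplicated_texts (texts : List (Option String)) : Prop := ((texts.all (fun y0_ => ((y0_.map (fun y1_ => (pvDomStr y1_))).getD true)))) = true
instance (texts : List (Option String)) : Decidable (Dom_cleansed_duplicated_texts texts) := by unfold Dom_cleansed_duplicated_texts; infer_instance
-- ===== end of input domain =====

-- B replaces A's single interleaved seen-set loop by two passes: a first-occurrence-index
-- dict, then a positional index-equality comparison (objective: alternative decomposition).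

-- ===== PORT A =====
def cleansed_duplicated_texts (texts : List (Option String)) : List (Option String) :=
  (texts.foldl
    (fun (st : List (Option String) × PySem.Set (Option String)) text =>
      if st.2.contains text then (st.1 ++ [none], st.2)
      else (st.1 ++ [text], st.2.add text))
    ([], PySem.Set.empty)).1

-- ===== PORT B =====
-- B's first pass: for i, t in enumerate(texts): if t not in first_index: first_index[t] = i
def pvFirstIndex (texts : List (Option String)) : PySem.Dict (Option String) Int :=
  (PySem.List.enumerate texts).foldl
    (fun d p => if d.contains p.2 then d else d.insert p.2 p.1) PySem.Dict.empty

-- B's second pass: [t if first_index[t] == i else None for i, t in enumerate(texts)]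
def cleansed_duplicated_texts_alt (texts : List (Option String)) : List (Option String) :=
  (PySem.List.enumerate texts).map
    (fun p => if (pvFirstIndex texts).getD p.2 (-1) == p.1 then p.2 else none)

-- ===== PRECONDITION & SPEC =====
def Spec_cleansed_duplicated_texts (texts : List (Option String)) (out : List (Option String)) : Prop := out = cleansed_duplicated_texts_alt texts
instance (texts : List (Option String)) (out : List (Option String)) : Decidable (Spec_cleansed_duplicated_texts texts out) := by unfold Spec_cleansed_duplicated_texts; infer_instance

-- ===== CLAIM (what is proved, stated in full; the proofs are below) =====
def Claim_equal_cleansed_duplicated_texts : Prop := ∀ (texts : List (Option String)), Dom_cleansed_duplicated_texts texts → Spec_cleansed_duplicated_texts texts (cleansed_duplicated_texts texts)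

-- ===== LEMMAS AND PROOFS =====

-- the pure per-element recursion A's loop implements
def procA (seen : PySem.Set (Option String)) : List (Option String) → List (Option String)
  | [] => []
  | t :: r => if seen.contains t then none :: procA seen r else t :: procA (seen.add t) r

theorem foldlA_eq_procA (rest : List (Option String)) (acc : List (Option String))
    (seen : PySem.Set (Option String)) :
    (rest.foldl
      (fun (st : List (Option String) × PySem.Set (Option String)) text =>
        if st.2.contains text then (st.1 ++ [none], st.2)
        else (st.1 ++ [text], st.2.add text)) (acc, seen)).1 = acc ++ procA seen rest := by
  induction rest generalizing acc seen with
  | nil => simp [procA]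
  | cons t r ih =>
    simp only [List.foldl_cons, procA]
    by_cases h : seen.contains t = true
    · rw [if_pos h, if_pos h, ih]
      simp
    · rw [if_neg h, if_neg h, ih]
      simp

-- positional characterisation of A's loop
theorem procA_getElem? (rest : List (Option String)) (seen : PySem.Set (Option String))
    (i : Nat) :
    (procA seen rest)[i]? =
      rest[i]?.map (fun t => if t ∈ seen ∨ t ∈ rest.take i then none else t) := by
  induction rest generalizing seen i with
  | nil => simp [procA]
  | cons t r ih =>
    match i with
    | 0 =>
      simp only [procA, List.take_zero, List.getElem?_cons_zero, Option.map_some,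
        List.not_mem_nil, or_false]
      by_cases hc : seen.contains t = true
      · rw [if_pos hc]
        simp [(PySem.Set.contains_iff seen t).mp hc]
      · have hn : t ∉ seen := fun hm => hc ((PySem.Set.contains_iff seen t).mpr hm)
        rw [if_neg hc]
        simp [hn]
    | i + 1 =>
      simp only [procA, List.take_succ_cons, List.getElem?_cons_succ]
      by_cases hc : seen.contains t = true
      · rw [if_pos hc, List.getElem?_cons_succ, ih seen i]
        cases hx : r[i]? with
        | none => rfl
        | some x =>
          simp only [Option.map_some]
          by_cases he : x = t
          · subst he
            simp [(PySem.Set.contains_iff seen x).mp hc]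
          · simp [List.mem_cons, he]
      · rw [if_neg hc, List.getElem?_cons_succ, ih (seen.add t) i]
        cases hx : r[i]? with
        | none => rfl
        | some x =>
          simp only [Option.map_some]
          have hiff : (x ∈ seen.add t ∨ x ∈ List.take i r) ↔ (x ∈ seen ∨ x ∈ t :: List.take i r) := by
            simp only [PySem.Set.mem_add, List.mem_cons]
            tauto
          by_cases hcond : x ∈ seen ∨ x ∈ t :: List.take i r
          · rw [if_pos (hiff.mpr hcond), if_pos hcond]
          · rw [if_neg (fun hl => hcond (hiff.mp hl)), if_neg hcond]

-- B's first pass is a keep-first fold: its lookups are the first matching pair of the list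
theorem foldB_get? (l : List (Int × Option String)) (d : PySem.Dict (Option String) Int)
    (t : Option String) :
    (l.foldl (fun d p => if d.contains p.2 then d else d.insert p.2 p.1) d).get? t =
      (d.get? t).or ((l.find? (fun p => p.2 == t)).map (·.1)) := by
  induction l generalizing d with
  | nil => simp
  | cons p r ih =>
    simp only [List.foldl_cons]
    by_cases hc : d.contains p.2 = true
    · rw [if_pos hc, ih]
      cases he : (p.2 == t) with
      | false => simp [List.find?_cons, he]
      | true =>
        have ht : p.2 = t := eq_of_beq he
        cases hd : d.get? t with
        | none =>
          exfalso
          have hf : d.contains t = false := (PySem.Dict.get?_eq_none_iff_contains d t).mp hd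
          rw [ht, hf] at hc
          exact Bool.false_ne_true hc
        | some v => simp [List.find?_cons, he, hd]
    · rw [if_neg hc, ih]
      have hdt : d.get? p.2 = none := (PySem.Dict.get?_eq_none_iff_contains d p.2).mpr (by simpa using hc)
      cases he : (p.2 == t) with
      | true =>
        have ht : p.2 = t := eq_of_beq he
        subst ht
        rw [PySem.Dict.get?_insert_self, hdt]
        simp [List.find?_cons, he]
      | false =>
        have hne : t ≠ p.2 := fun h => by simp [h] at he
        rw [PySem.Dict.get?_insert_of_ne d p.1 hne]
        simp [List.find?_cons, he]

-- the first matching pair of an enumeration is at the first occurrence (idxOf)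
theorem find?_enumerate_beq (l : List (Option String)) (s : Int) (t : Option String) :
    ((PySem.List.enumerate l s).find? (fun p => p.2 == t)).map (·.1) =
      if t ∈ l then some (s + (l.idxOf t : Int)) else none := by
  induction l generalizing s with
  | nil => simp [PySem.List.enumerate_nil]
  | cons x r ih =>
    rw [PySem.List.enumerate_cons]
    by_cases he : x = t
    · subst he
      simp [List.find?_cons, List.idxOf_cons_self]
    · have hbe : (x == t) = false := beq_eq_false_iff_ne.mpr he
      have hstep : ((PySem.List.enumerate r (s + 1)).find? (fun p => p.2 == t)).map (·.1) =
          ((((s, x) : Int × Option String) :: PySem.List.enumerate r (s + 1)).find?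
            (fun p => p.2 == t)).map (·.1) := by
        simp [List.find?_cons, hbe]
      rw [← hstep, ih (s + 1)]
      by_cases hm : t ∈ r
      · rw [if_pos hm, if_pos (List.mem_cons_of_mem _ hm)]
        rw [List.idxOf_cons_ne _ he]
        congr 1
        push_cast
        ring
      · rw [if_neg hm, if_neg (by simp [hm, Ne.symm he])]

-- the first occurrence of l[i] is at i exactly when l[i] does not occur earlier
theorem idxOf_eq_iff (l : List (Option String)) (i : Nat) (h : i < l.length) :
    l.idxOf l[i] = i ↔ l[i] ∉ l.take i := by
  induction l generalizing i with
  | nil => exact absurd h (by simp)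
  | cons x r ih =>
    match i with
    | 0 => simp [List.idxOf_cons_self]
    | i + 1 =>
      have h' : i < r.length := by simpa using h
      simp only [List.getElem_cons_succ, List.take_succ_cons, List.mem_cons]
      by_cases he : r[i] = x
      · rw [← he, List.idxOf_cons_self]
        simp [he]
      · rw [List.idxOf_cons_ne _ (by simpa using Ne.symm he)]
        rw [Nat.succ_inj]
        rw [ih i h']
        simp [he]

-- ===== VERDICT (by name: the statement is the Claim_ definition above) =====
theorem cleansed_duplicated_texts_spec : Claim_equal_cleansed_duplicated_texts := by
  intro texts _
  unfold Spec_cleansed_duplicated_texts cleansed_duplicated_texts cleansed_duplicated_texts_alt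
  rw [foldlA_eq_procA texts [] PySem.Set.empty, List.nil_append]
  apply List.ext_getElem?
  intro i
  rw [procA_getElem?, List.getElem?_map, PySem.List.getElem?_enumerate]
  cases hx : texts[i]? with
  | none => rfl
  | some t =>
    obtain ⟨hlt, heq⟩ := List.getElem?_eq_some_iff.mp hx
    subst heq
    have hmem : texts[i] ∈ texts := List.getElem_mem hlt
    have hget : (pvFirstIndex texts).get? texts[i] = some (0 + (texts.idxOf texts[i] : Int)) := by
      rw [pvFirstIndex, foldB_get?, PySem.Dict.get?_empty, Option.none_or,
        find?_enumerate_beq, if_pos hmem]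
    have hgetD : (pvFirstIndex texts).getD texts[i] (-1) = (texts.idxOf texts[i] : Int) := by
      rw [PySem.Dict.getD_eq_get?_getD, hget]
      simp
    have hempty : texts[i] ∉ (PySem.Set.empty : PySem.Set (Option String)) := by
      simp [PySem.Set.empty]
    simp only [Option.map_some, hgetD]
    by_cases hEq : texts.idxOf texts[i] = i
    · have hB : ((texts.idxOf texts[i] : Int) == 0 + (i : Int)) = true := by
        simp [beq_iff_eq, hEq]
      have hA : ¬ (texts[i] ∈ (PySem.Set.empty : PySem.Set (Option String)) ∨ texts[i] ∈ texts.take i) := by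
        rintro (h1 | h2)
        · exact hempty h1
        · exact ((idxOf_eq_iff texts i hlt).mp hEq) h2
      rw [if_neg hA, if_pos hB]
    · have hB : ¬ (((texts.idxOf texts[i] : Int) == 0 + (i : Int)) = true) := by
        simp only [beq_iff_eq, zero_add, Int.natCast_inj]
        exact hEq
      have hA : texts[i] ∈ (PySem.Set.empty : PySem.Set (Option String)) ∨ texts[i] ∈ texts.take i :=
        Or.inr (by by_contra hni; exact hEq ((idxOf_eq_iff texts i hlt).mpr hni))
      rw [if_pos hA, if_neg hB]
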